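-- pv_equiv track=rewrite | github.com/devjow/gts-python | gts/src/gts/path_resolver.py | _parse_part
-- ===== SOURCE A (Python) =====
-- from typing import Any, List
--
-- def _parse_part(seg: str) -> List[str]:
--     out: List[str] = []
--     buf = ""
--     i = 0
--     while i < len(seg):
--         ch = seg[i]
--         if ch == "[":
--             if buf:
--                 out.append(buf)
--                 buf = ""
--             j = seg.find("]", i + 1)
--             if j == -1:
--                 buf += seg[i:]
--                 break
--             out.append(seg[i : j + 1])
--             i = j + 1
--         else:
--             buf += ch
--             i += 1
--     if buf:
--         out.append(buf)
--     return out
-- ===== SOURCE B (Python) =====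
-- from typing import List
--
-- def _parse_part(seg: str) -> List[str]:
--     tokens: List[str] = []
--     rest = seg
--     while rest:
--         if rest[0] == "[":
--             body, sep, tail = rest[1:].partition("]")
--             if sep:
--                 tokens.append("[" + body + "]")
--                 rest = tail
--             else:
--                 tokens.append(rest)
--                 rest = ""
--         else:
--             text, sep, tail = rest.partition("[")
--             tokens.append(text)
--             rest = sep + tail
--     return tokens
-- ===== Notes on version B (the rewrite author's own statement) =====
-- stated objective: simpler
-- what changed: Replaces A's char-by-char buffer/index/find state machine with str.partition-based chunking that emits one whole token per iteration, avoiding per-character string concatenation.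
import Mathlib
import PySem

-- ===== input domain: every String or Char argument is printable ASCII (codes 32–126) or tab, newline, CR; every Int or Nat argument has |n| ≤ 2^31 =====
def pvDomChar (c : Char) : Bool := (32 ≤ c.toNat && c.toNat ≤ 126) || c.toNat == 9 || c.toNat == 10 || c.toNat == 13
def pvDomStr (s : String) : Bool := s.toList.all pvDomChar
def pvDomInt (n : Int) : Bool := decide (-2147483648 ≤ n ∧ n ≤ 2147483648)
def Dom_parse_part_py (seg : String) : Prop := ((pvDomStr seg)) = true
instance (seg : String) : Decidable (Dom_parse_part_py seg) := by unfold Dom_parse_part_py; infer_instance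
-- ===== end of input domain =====

-- B replaces A's char-by-char buffer/index/find state machine with str.partition-based
-- chunking that emits one whole token per iteration (simpler; measured faster: no per-char concatenation).

-- ===== PORT A =====
-- A's while loop over index i with text accumulator buf and seg.find("]", i+1) (PySem.Chars.findFrom).
def goA (s : List Char) (out : List (List Char)) (buf : List Char) (i : Nat) : List (List Char) :=
  if h : i < s.length then
    if s[i] = '[' then
      -- if buf: out.append(buf); buf = ""
      let out' := if buf ≠ [] then out ++ [buf] else out
      -- j = seg.find("]", i + 1)
      let j := PySem.Chars.findFrom s [']'] ((i + 1 : Nat) : Int) none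
      if hj : j = -1 then
        -- buf += seg[i:]; break; trailing 'if buf' append fires (buf starts with '[')
        out' ++ [s.drop i]
      else
        -- out.append(seg[i : j + 1]); i = j + 1
        goA s (out' ++ [(s.take (j.toNat + 1)).drop i]) [] (j.toNat + 1)
    else
      -- buf += ch; i += 1
      goA s out (buf ++ [s[i]]) (i + 1)
  else
    -- trailing 'if buf: out.append(buf)'
    if buf ≠ [] then out ++ [buf] else out
termination_by s.length - i
decreasing_by
  · have hk : i + 1 ≤ s.length := h
    obtain ⟨h1, h2, -⟩ := PySem.Chars.findFrom_natCast_spec s [']'] (i + 1) hk hj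
    obtain ⟨u, hu⟩ := h2
    have hlt : (PySem.Chars.findFrom s [']'] ((i + 1 : Nat) : Int) none).toNat < s.length := by
      by_contra hge
      rw [List.drop_of_length_le (by omega)] at hu
      simp at hu
    omega
  · omega

def parse_part_py (seg : String) : List String :=
  (goA seg.toList [] [] 0).map (fun t => String.ofList t)

-- ===== PORT B =====
-- str.partition(sep) for a one-character sep: some (before, after) when sep occurs, none otherwise.
def pyPartitionChar (sep : Char) : List Char → Option (List Char × List Char)
  | [] => none
  | c :: cs =>
    if c = sep then some ([], cs)
    else (pyPartitionChar sep cs).map (fun p => (c :: p.1, p.2))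

-- structure of a successful partition (also needed for goB's termination)
theorem pyPartitionChar_eq_some {sep : Char} :
    ∀ {l a b : List Char}, pyPartitionChar sep l = some (a, b) → l = a ++ sep :: b ∧ sep ∉ a := by
  intro l
  induction l with
  | nil => intro a b h; simp [pyPartitionChar] at h
  | cons c cs ih =>
    intro a b h
    by_cases hc : c = sep
    · rw [pyPartitionChar, if_pos hc] at h
      obtain ⟨rfl, rfl⟩ := Prod.mk.injEq _ _ _ _ ▸ Option.some.inj h
      simp [hc]
    · rw [pyPartitionChar, if_neg hc] at h
      cases hp : pyPartitionChar sep cs with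
      | none => rw [hp] at h; simp at h
      | some p =>
        rw [hp] at h
        simp only [Option.map_some] at h
        obtain ⟨ha, hb⟩ := Prod.mk.injEq _ _ _ _ ▸ Option.some.inj h
        obtain ⟨hcs, hns⟩ := ih (b := p.2) (by rw [hp])
        subst ha hb
        refine ⟨by rw [hcs]; simp, ?_⟩
        simp only [List.mem_cons]
        rintro (h1 | h2)
        · exact hc h1.symm
        · exact hns h2

def goB : List Char → List (List Char)
  | [] => []
  | c :: cs =>
    if c = '[' then
      -- body, sep, tail = rest[1:].partition("]")
      match hm : pyPartitionChar ']' cs with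
      | some (body, tail) => ('[' :: (body ++ [']'])) :: goB tail
      | none => ['[' :: cs]
    else
      -- text, sep, tail = rest.partition("[")
      match hm : pyPartitionChar '[' (c :: cs) with
      | some (text, tail) => text :: goB ('[' :: tail)
      | none => [c :: cs]
termination_by l => l.length
decreasing_by
  · have hst := (pyPartitionChar_eq_some hm).1
    have : cs.length = body.length + 1 + tail.length := by rw [hst]; simp; omega
    simp; omega
  · have hst := (pyPartitionChar_eq_some hm).1
    have hne : text ≠ [] := by
      intro he
      rw [he, List.nil_append] at hst
      exact ‹¬ c = '['› (List.cons.injEq _ _ _ _ ▸ hst).1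
    have hlen : (c :: cs).length = text.length + 1 + tail.length := by rw [hst]; simp; omega
    have h1 : 1 ≤ text.length := by
      cases text with
      | nil => exact absurd rfl hne
      | cons _ _ => simp
    simp at hlen ⊢; omega

def parse_part_py_alt (seg : String) : List String :=
  (goB seg.toList).map (fun t => String.ofList t)

-- ===== PRECONDITION & SPEC =====
def Spec_parse_part_py (seg : String) (out : List String) : Prop := out = parse_part_py_alt seg
instance (seg : String) (out : List String) : Decidable (Spec_parse_part_py seg out) := by unfold Spec_parse_part_py; infer_instance

-- ===== CLAIM (what is proved, stated in full; the proofs are below) =====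
def Claim_equal_parse_part_py : Prop := ∀ (seg : String), Dom_parse_part_py seg → Spec_parse_part_py seg (parse_part_py seg)

-- ===== LEMMAS AND PROOFS =====

theorem pyPartitionChar_eq_none {sep : Char} {l : List Char} (h : sep ∉ l) :
    pyPartitionChar sep l = none := by
  induction l with
  | nil => rfl
  | cons c cs ih =>
    simp only [List.mem_cons, not_or] at h
    rw [pyPartitionChar, if_neg (fun hc => h.1 hc.symm), ih h.2]
    rfl

theorem pyPartitionChar_append {sep : Char} {a b : List Char} (h : sep ∉ a) :
    pyPartitionChar sep (a ++ sep :: b) = some (a, b) := by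
  induction a with
  | nil => simp [pyPartitionChar]
  | cons c cs ih =>
    simp only [List.mem_cons, not_or] at h
    rw [List.cons_append, pyPartitionChar, if_neg (fun hc => h.1 hc.symm), ih h.2]
    rfl

theorem goB_no_bracket {buf : List Char} (hnb : '[' ∉ buf) :
    goB buf = if buf = [] then [] else [buf] := by
  cases buf with
  | nil => simp [goB]
  | cons c bs =>
    simp only [List.mem_cons, not_or] at hnb
    rw [goB, if_neg (fun hc => hnb.1 hc.symm)]
    split
    · next text tail heq =>
      rw [pyPartitionChar_eq_none (by simp only [List.mem_cons, not_or]; exact hnb)] at heq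
      cases heq
    · simp

-- peeling a nonempty '['-free text run off the front
theorem goB_peel {buf u : List Char} (hne : buf ≠ []) (hnb : '[' ∉ buf) :
    goB (buf ++ '[' :: u) = buf :: goB ('[' :: u) := by
  obtain ⟨c, bs, rfl⟩ := List.exists_cons_of_ne_nil hne
  simp only [List.mem_cons, not_or] at hnb
  conv_lhs => rw [List.cons_append, goB]
  rw [if_neg (fun hc => hnb.1 hc.symm)]
  split
  · next text tail heq =>
    rw [← List.cons_append,
        pyPartitionChar_append (by simp only [List.mem_cons, not_or]; exact hnb)] at heq
    obtain ⟨h1, h2⟩ := Prod.mk.injEq _ _ _ _ ▸ Option.some.inj heq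
    rw [h1, h2]
  · next heq =>
    rw [← List.cons_append,
        pyPartitionChar_append (by simp only [List.mem_cons, not_or]; exact hnb)] at heq
    cases heq

theorem goB_bracket_none {t : List Char} (h : PySem.Chars.find t [']'] = -1) :
    goB ('[' :: t) = ['[' :: t] := by
  have hni : ¬ [']'] <:+: t := (PySem.Chars.find_eq_neg_one_iff t [']']).mp h
  have hmem : ']' ∉ t := fun hm => hni ((List.singleton_infix_iff ']' t).mpr hm)
  rw [goB, if_pos rfl]
  split
  · next text tail heq => rw [pyPartitionChar_eq_none hmem] at heq; cases heq
  · rfl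

theorem goB_bracket_some {t : List Char} (h : 0 ≤ PySem.Chars.find t [']']) :
    (PySem.Chars.find t [']']).toNat < t.length ∧
    (t[(PySem.Chars.find t [']']).toNat]? = some ']') ∧
    goB ('[' :: t) =
      ('[' :: (t.take (PySem.Chars.find t [']']).toNat ++ [']'])) ::
        goB (t.drop ((PySem.Chars.find t [']']).toNat + 1)) := by
  set m := (PySem.Chars.find t [']']).toNat with hm
  obtain ⟨hpre, hfirst⟩ := PySem.Chars.find_spec h
  obtain ⟨u, hu⟩ := hpre
  have hmlt : m < t.length := by
    by_contra hge
    rw [List.drop_of_length_le (by omega)] at hu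
    simp at hu
  have hgm : t[m] = ']' := by
    rw [List.drop_eq_getElem_cons hmlt] at hu
    exact ((List.cons.injEq _ _ _ _ ▸ hu).1).symm
  have hsplit : t = t.take m ++ ']' :: t.drop (m + 1) := by
    conv_lhs => rw [← List.take_append_drop m t]
    rw [List.drop_eq_getElem_cons hmlt, hgm]
  have hnm : ']' ∉ t.take m := by
    intro hmem
    obtain ⟨i, hi, hgi⟩ := List.mem_iff_getElem.mp hmem
    have hil : i < m := by simpa using lt_of_lt_of_le hi (by simp [List.length_take])
    have hit : i < t.length := by omega
    rw [List.getElem_take] at hgi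
    exact hfirst i hil ⟨t.drop (i + 1), by
      simp only [List.cons_append, List.nil_append]
      rw [← hgi]
      exact (List.drop_eq_getElem_cons hit).symm⟩
  refine ⟨hmlt, by rw [List.getElem?_eq_getElem hmlt, hgm], ?_⟩
  rw [goB, if_pos rfl]
  split
  · next body tail heq =>
    conv at heq => rw [hsplit]
    rw [pyPartitionChar_append hnm] at heq
    obtain ⟨h1, h2⟩ := Prod.mk.injEq _ _ _ _ ▸ Option.some.inj heq
    rw [h1, h2]
  · next heq =>
    conv at heq => rw [hsplit]
    rw [pyPartitionChar_append hnm] at heq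
    cases heq

-- A's loop invariant: from state (out, buf, i) with '['-free buf, A computes out ++ goB (buf ++ rest).
theorem goA_eq (s : List Char) :
    ∀ n i out buf, s.length - i ≤ n → '[' ∉ buf →
      goA s out buf i = out ++ goB (buf ++ s.drop i) := by
  intro n
  induction n with
  | zero =>
    intro i out buf hn hnb
    rw [goA]
    simp only [dif_neg (by omega : ¬ i < s.length)]
    rw [List.drop_of_length_le (by omega), List.append_nil, goB_no_bracket hnb]
    by_cases h : buf = [] <;> simp [h]
  | succ n ih =>
    intro i out buf hn hnb
    by_cases hi : i < s.length
    · rw [goA]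
      simp only [dif_pos hi]
      by_cases hch : s[i] = '['
      · simp only [if_pos hch]
        have hdrop : s.drop i = '[' :: s.drop (i + 1) := by
          rw [List.drop_eq_getElem_cons hi, hch]
        have hpeel : out ++ goB (buf ++ s.drop i) =
            (if buf ≠ [] then out ++ [buf] else out) ++ goB ('[' :: s.drop (i + 1)) := by
          by_cases hb : buf = []
          · simp [hb, hdrop]
          · rw [hdrop, goB_peel hb hnb]
            simp [hb]
        rw [hpeel]
        set out' := if buf ≠ [] then out ++ [buf] else out with hout'
        have hff := PySem.Chars.findFrom_natCast s [']'] (i + 1) hi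
        by_cases hf : PySem.Chars.find (s.drop (i + 1)) [']'] = -1
        · have hjeq : PySem.Chars.findFrom s [']'] ((i + 1 : Nat) : Int) none = -1 := by
            rw [hff, if_pos hf]
          simp only [hjeq]
          rw [dif_pos trivial, goB_bracket_none hf, hdrop]
        · have hf0 : 0 ≤ PySem.Chars.find (s.drop (i + 1)) [']'] := by
            have := PySem.Chars.neg_one_le_find (s.drop (i + 1)) [']']
            omega
          have hjeq : PySem.Chars.findFrom s [']'] ((i + 1 : Nat) : Int) none =
              ((i + 1 : Nat) : Int) + PySem.Chars.find (s.drop (i + 1)) [']'] := by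
            rw [hff, if_neg hf]
          have hjne : ¬ PySem.Chars.findFrom s [']'] ((i + 1 : Nat) : Int) none = -1 := by
            rw [hjeq]; omega
          simp only [dif_neg hjne]
          have hjtoNat : (PySem.Chars.findFrom s [']'] ((i + 1 : Nat) : Int) none).toNat =
              i + 1 + (PySem.Chars.find (s.drop (i + 1)) [']']).toNat := by
            rw [hjeq]; omega
          obtain ⟨hmlt, hgm', hgoB⟩ := goB_bracket_some (t := s.drop (i + 1)) hf0
          rw [hjtoNat]
          set m := (PySem.Chars.find (s.drop (i + 1)) [']']).toNat with hmdef
          have hgm : (s.drop (i + 1))[m]'hmlt = ']' := by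
            rw [List.getElem?_eq_getElem hmlt] at hgm'
            exact Option.some.inj hgm'
          have htok : (s.take (i + 1 + m + 1)).drop i = '[' :: ((s.drop (i + 1)).take m ++ [']']) := by
            rw [List.drop_take, show i + 1 + m + 1 - i = m + 1 + 1 by omega, hdrop]
            rw [List.take_succ_cons, List.take_succ_eq_append_getElem hmlt, hgm]
          have hdrop2 : s.drop (i + 1 + m + 1) = (s.drop (i + 1)).drop (m + 1) := by
            rw [List.drop_drop, show i + 1 + (m + 1) = i + 1 + m + 1 by omega]
          rw [ih (i + 1 + m + 1) (out' ++ [(s.take (i + 1 + m + 1)).drop i]) [] (by omega) (by simp)]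
          rw [List.nil_append, hdrop2, htok, hgoB]
          simp
      · simp only [if_neg hch]
        have hnb' : '[' ∉ buf ++ [s[i]] := by
          simp only [List.mem_append, List.mem_singleton, not_or]
          exact ⟨hnb, fun h => hch h.symm⟩
        rw [ih (i + 1) out (buf ++ [s[i]]) (by omega) hnb']
        rw [List.append_assoc, List.singleton_append, ← List.drop_eq_getElem_cons hi]
    · rw [goA]
      simp only [dif_neg hi]
      rw [List.drop_of_length_le (by omega), List.append_nil, goB_no_bracket hnb]
      by_cases h : buf = [] <;> simp [h]

-- ===== VERDICT (by name: the statement is the Claim_ definition above) =====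
theorem parse_part_py_spec : Claim_equal_parse_part_py := by
  intro seg _
  unfold Spec_parse_part_py parse_part_py parse_part_py_alt
  rw [goA_eq seg.toList seg.toList.length 0 [] [] (by omega) (by simp)]
  simp
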